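-- pv_equiv track=rewrite | github.com/ppmferreira/GFEditor | src/modules/items/flags.py | encode_restrict_class
-- ===== SOURCE A (Python) =====
-- CLASSES = [
--     # Guerreiras (Warrior-like)
--     'Lutador','Guerreiro','Berzerker','Paladino','Titan','Templario','Cavaleiro da Morte','Cavaleiro Real','Destruidor','Cavaleiro Sagrado',
--     # Arqueiras (Archer-like)
--     'Cacador','Arqueiro','Ranger','Assassin','Franco Atirador','Sicario Sombrio','Mercenario','Ninja','Predador','Shinobi',
--     # Sacerdotes (Priest-like)
--     'Acolito','Sacerdote','Clerigo','Sabio','Profeta','Mistico','Mensageiro Divino','Xama','Arcanjo','Druida',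
--     # Magicas (Magic)
--     'Bruxo','Mago','Feiticeiro','Necromante','Arquimago','Demonologo','Arcano','Emissario dos Mortos','Shinigami',
--     # Maquinista (Machinist)
--     'Maquinista Aprendiz','Maquinista','Agressor','Demolidor','Prime','Optimus','Megatron','Galvatron','Omega','Titan Celeste',
--     # Viajante (Traveler)
--     'Viajante','Nomade','Espadachim','Ilusionista','Samurai','Augure','Ronin','Oraculo','Mestre Dimensional','Cronos'
-- ]
--
-- def encode_restrict_class(class_names: list) -> int:
--     """Encode a list of class names into a RestrictClass bitmask using CLASSES order."""
--     mask = 0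
--     for cname in class_names:
--         try:
--             idx = CLASSES.index(cname)
--             mask |= (1 << idx)
--         except ValueError:
--             # ignore unknown class names
--             pass
--     return mask
-- ===== SOURCE B (Python) =====
-- # Precomputed name -> bit table; sum of distinct bits replaces repeated CLASSES.index + OR.
-- BIT = {
--     'Lutador': 1,
--     'Guerreiro': 2,
--     'Berzerker': 4,
--     'Paladino': 8,
--     'Titan': 16,
--     'Templario': 32,
--     'Cavaleiro da Morte': 64,
--     'Cavaleiro Real': 128,
--     'Destruidor': 256,
--     'Cavaleiro Sagrado': 512,
--     'Cacador': 1024,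
--     'Arqueiro': 2048,
--     'Ranger': 4096,
--     'Assassin': 8192,
--     'Franco Atirador': 16384,
--     'Sicario Sombrio': 32768,
--     'Mercenario': 65536,
--     'Ninja': 131072,
--     'Predador': 262144,
--     'Shinobi': 524288,
--     'Acolito': 1048576,
--     'Sacerdote': 2097152,
--     'Clerigo': 4194304,
--     'Sabio': 8388608,
--     'Profeta': 16777216,
--     'Mistico': 33554432,
--     'Mensageiro Divino': 67108864,
--     'Xama': 134217728,
--     'Arcanjo': 268435456,
--     'Druida': 536870912,
--     'Bruxo': 1073741824,
--     'Mago': 2147483648,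
--     'Feiticeiro': 4294967296,
--     'Necromante': 8589934592,
--     'Arquimago': 17179869184,
--     'Demonologo': 34359738368,
--     'Arcano': 68719476736,
--     'Emissario dos Mortos': 137438953472,
--     'Shinigami': 274877906944,
--     'Maquinista Aprendiz': 549755813888,
--     'Maquinista': 1099511627776,
--     'Agressor': 2199023255552,
--     'Demolidor': 4398046511104,
--     'Prime': 8796093022208,
--     'Optimus': 17592186044416,
--     'Megatron': 35184372088832,
--     'Galvatron': 70368744177664,
--     'Omega': 140737488355328,
--     'Titan Celeste': 281474976710656,
--     'Viajante': 562949953421312,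
--     'Nomade': 1125899906842624,
--     'Espadachim': 2251799813685248,
--     'Ilusionista': 4503599627370496,
--     'Samurai': 9007199254740992,
--     'Augure': 18014398509481984,
--     'Ronin': 36028797018963968,
--     'Oraculo': 72057594037927936,
--     'Mestre Dimensional': 144115188075855872,
--     'Cronos': 288230376151711744
-- }
--
-- def encode_restrict_class(class_names: list) -> int:
--     """Encode a list of class names into a RestrictClass bitmask using CLASSES order."""
--     names = set(class_names)
--     return sum(bit for name, bit in BIT.items() if name in names)
-- ===== Notes on version B (the rewrite author's own statement) =====
-- stated objective: faster
-- what changed: B precomputes a name-to-bit lookup table, turns the input list into a set once, and returns the sum of the bits whose name is in that set, replacing A's per-name CLASSES.index scan with try/except and OR accumulation.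
import Mathlib
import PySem

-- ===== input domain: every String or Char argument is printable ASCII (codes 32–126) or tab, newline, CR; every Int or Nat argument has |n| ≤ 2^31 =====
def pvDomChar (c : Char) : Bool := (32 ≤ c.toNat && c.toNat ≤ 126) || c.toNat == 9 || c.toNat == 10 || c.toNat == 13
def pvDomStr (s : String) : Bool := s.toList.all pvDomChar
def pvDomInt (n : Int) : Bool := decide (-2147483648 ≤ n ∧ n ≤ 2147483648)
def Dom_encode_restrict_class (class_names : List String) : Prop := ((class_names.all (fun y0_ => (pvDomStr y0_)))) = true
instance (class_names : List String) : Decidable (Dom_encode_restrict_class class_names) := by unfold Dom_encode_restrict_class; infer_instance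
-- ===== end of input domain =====

-- B replaces the per-name CLASSES.index/try-except/OR loop with a precomputed name→bit table,
-- a set of the input names, and a sum of the selected (distinct) bits.

-- ===== PORT A =====
-- the module-level CLASSES table
def pvCLASSES : List String := ["Lutador", "Guerreiro", "Berzerker", "Paladino", "Titan", "Templario", "Cavaleiro da Morte", "Cavaleiro Real", "Destruidor", "Cavaleiro Sagrado", "Cacador", "Arqueiro", "Ranger", "Assassin", "Franco Atirador", "Sicario Sombrio", "Mercenario", "Ninja", "Predador", "Shinobi", "Acolito", "Sacerdote", "Clerigo", "Sabio", "Profeta", "Mistico", "Mensageiro Divino", "Xama", "Arcanjo", "Druida", "Bruxo", "Mago", "Feiticeiro", "Necromante", "Arquimago", "Demonologo", "Arcano", "Emissario dos Mortos", "Shinigami", "Maquinista Aprendiz", "Maquinista", "Agressor", "Demolidor", "Prime", "Optimus", "Megatron", "Galvatron", "Omega", "Titan Celeste", "Viajante", "Nomade", "Espadachim", "Ilusionista", "Samurai", "Augure", "Ronin", "Oraculo", "Mestre Dimensional", "Cronos"]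

def encode_restrict_class (class_names : List String) : Int :=
  class_names.foldl (fun mask cname =>
    match PySem.List.index? pvCLASSES cname with
    | some idx => PySem.Int.bor mask ((1 : Int) <<< idx)
    | none => mask) 0

-- ===== PORT B =====
-- the module-level BIT table of Source B: each class name paired with its precomputed bit
def pvBIT : List (String × Int) := [("Lutador", 1), ("Guerreiro", 2), ("Berzerker", 4), ("Paladino", 8), ("Titan", 16), ("Templario", 32), ("Cavaleiro da Morte", 64), ("Cavaleiro Real", 128), ("Destruidor", 256), ("Cavaleiro Sagrado", 512), ("Cacador", 1024), ("Arqueiro", 2048), ("Ranger", 4096), ("Assassin", 8192), ("Franco Atirador", 16384), ("Sicario Sombrio", 32768), ("Mercenario", 65536), ("Ninja", 131072), ("Predador", 262144), ("Shinobi", 524288), ("Acolito", 1048576), ("Sacerdote", 2097152), ("Clerigo", 4194304), ("Sabio", 8388608), ("Profeta", 16777216), ("Mistico", 33554432), ("Mensageiro Divino", 67108864), ("Xama", 134217728), ("Arcanjo", 268435456), ("Druida", 536870912), ("Bruxo", 1073741824), ("Mago", 2147483648), ("Feiticeiro", 4294967296), ("Necromante", 8589934592), ("Arquimago", 17179869184),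 ("Demonologo", 34359738368), ("Arcano", 68719476736), ("Emissario dos Mortos", 137438953472), ("Shinigami", 274877906944), ("Maquinista Aprendiz", 549755813888), ("Maquinista", 1099511627776), ("Agressor", 2199023255552), ("Demolidor", 4398046511104), ("Prime", 8796093022208), ("Optimus", 17592186044416), ("Megatron", 35184372088832), ("Galvatron", 70368744177664), ("Omega", 140737488355328), ("Titan Celeste", 281474976710656), ("Viajante", 562949953421312), ("Nomade", 1125899906842624), ("Espadachim", 2251799813685248), ("Ilusionista", 4503599627370496), ("Samurai", 9007199254740992), ("Augure", 18014398509481984), ("Ronin", 36028797018963968), ("Oraculo", 72057594037927936), ("Mestre Dimensional", 144115188075855872), ("Cronos", 288230376151711744)]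

-- sum(bit for name, bit in BIT.items() if name in names), as structural recursion over the items
def pvSumBits (names : PySem.Set String) : List (String × Int) → Int
  | [] => 0
  | (n, bit) :: rest => (if PySem.Set.contains names n then bit else 0) + pvSumBits names rest

def encode_restrict_class_alt (class_names : List String) : Int :=
  pvSumBits (PySem.Set.ofList class_names) pvBIT

-- ===== PRECONDITION & SPEC =====
def Spec_encode_restrict_class (class_names : List String) (out : Int) : Prop := out = encode_restrict_class_alt class_names
instance (class_names : List String) (out : Int) : Decidable (Spec_encode_restrict_class class_names out) := by unfold Spec_encode_restrict_class; infer_instance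

-- ===== CLAIM (what is proved, stated in full; the proofs are below) =====
def Claim_equal_encode_restrict_class : Prop := ∀ (class_names : List String), Dom_encode_restrict_class class_names → Spec_encode_restrict_class class_names (encode_restrict_class class_names)

-- ===== LEMMAS AND PROOFS =====

-- Nat-valued shadows of the two computations (all intermediate values are nonnegative)
def pvEnumN (s : Nat) : List String → List (Nat × String)
  | [] => []
  | x :: xs => (s, x) :: pvEnumN (s + 1) xs

def pvTblN (s : Nat) : List String → List (String × Nat)
  | [] => []
  | x :: xs => (x, 1 <<< s) :: pvTblN (s + 1) xs

def pvMaskA (acc : Nat) (cs : List String) : Nat :=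
  cs.foldl (fun m c =>
    match PySem.List.index? pvCLASSES c with
    | some i => m ||| (1 <<< i)
    | none => m) acc

def pvMaskB (cs : List String) (acc : Nat) (L : List (Nat × String)) : Nat :=
  L.foldl (fun m p => if cs.contains p.2 then m ||| (1 <<< p.1) else m) acc

def pvSumN (cs : List String) : List (String × Nat) → Nat
  | [] => 0
  | (n, b) :: rest => (if cs.contains n then b else 0) + pvSumN cs rest

def pvBit (c : String) : Nat :=
  match PySem.List.index? pvCLASSES c with
  | some i => 1 <<< i
  | none => 0

theorem pvCLASSES_nodup : pvCLASSES.Nodup := by decide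

theorem pvBIT_eq_tbl : pvBIT = (pvTblN 0 pvCLASSES).map (fun p => (p.1, (p.2 : Int))) := by decide

theorem lor_left_comm' (a b c : Nat) : a ||| (b ||| c) = b ||| (a ||| c) := by
  rw [← Nat.lor_assoc, Nat.lor_comm a b, Nat.lor_assoc]

theorem lor21 (m : Nat) : (2*m) ||| 1 = 2*m+1 := by
  have := Nat.lor_bit false m true 0
  simpa [Nat.bit] using this

theorem shl_lor (a b s : Nat) : (a <<< s) ||| (b <<< s) = (a ||| b) <<< s := by
  apply Nat.eq_of_testBit_eq
  intro i
  simp [Nat.testBit_shiftLeft, Bool.and_or_distrib_left]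

theorem lor_disj_add (s m : Nat) : (1 <<< s) ||| (m <<< (s+1)) = (1 <<< s) + (m <<< (s+1)) := by
  have h1 : m <<< (s+1) = (2*m) <<< s := by
    simp [Nat.shiftLeft_eq, Nat.pow_succ]; ring
  rw [h1, shl_lor, Nat.lor_comm, lor21, Nat.shiftLeft_eq, Nat.shiftLeft_eq, Nat.shiftLeft_eq]
  ring

theorem castA (cs : List String) (acc : Nat) :
    cs.foldl (fun mask cname =>
      match PySem.List.index? pvCLASSES cname with
      | some idx => PySem.Int.bor mask ((1 : Int) <<< idx)
      | none => mask) (acc : Int) = ((pvMaskA acc cs : Nat) : Int) := by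
  induction cs generalizing acc with
  | nil => rfl
  | cons c cs ih =>
    simp only [pvMaskA, List.foldl_cons]
    cases h : PySem.List.index? pvCLASSES c with
    | none => exact ih acc
    | some i =>
      have hb : PySem.Int.bor (acc : Int) ((1 : Int) <<< i) = ((acc ||| (1 <<< i) : Nat) : Int) := by
        rw [show ((1 : Int) <<< i) = (((1 <<< i : Nat)) : Int) by simp, PySem.Int.bor_natCast]
      dsimp only
      rw [hb]
      exact ih (acc ||| (1 <<< i))

-- the Set.ofList membership test agrees with plain list membership
theorem contains_ofList (cs : List String) (n : String) :
    PySem.Set.contains (PySem.Set.ofList cs) n = cs.contains n := by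
  rw [PySem.Set.contains_eq_listContains]
  by_cases h : n ∈ cs <;> simp [PySem.Set.mem_ofList, h]

theorem castB (cs : List String) (L : List (String × Nat)) :
    pvSumBits (PySem.Set.ofList cs) (L.map (fun p => (p.1, (p.2 : Int)))) = ((pvSumN cs L : Nat) : Int) := by
  induction L with
  | nil => rfl
  | cons p L ih =>
    obtain ⟨n, b⟩ := p
    simp only [List.map_cons, pvSumBits, pvSumN, contains_ofList]
    rw [ih]
    by_cases h : cs.contains n = true
    · rw [if_pos h, if_pos h]; push_cast; ring
    · rw [if_neg h, if_neg h]; push_cast; ring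

theorem splitA (cs : List String) (acc : Nat) : pvMaskA acc cs = acc ||| pvMaskA 0 cs := by
  induction cs generalizing acc with
  | nil => simp [pvMaskA]
  | cons c cs ih =>
    simp only [pvMaskA, List.foldl_cons]
    cases h : PySem.List.index? pvCLASSES c with
    | none =>
      exact ih acc
    | some i =>
      show pvMaskA (acc ||| (1 <<< i)) cs = acc ||| pvMaskA (0 ||| (1 <<< i)) cs
      rw [ih (acc ||| (1 <<< i)), ih (0 ||| (1 <<< i))]
      simp [Nat.lor_assoc]

theorem splitB (cs : List String) (L : List (Nat × String)) (acc : Nat) :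
    pvMaskB cs acc L = acc ||| pvMaskB cs 0 L := by
  induction L generalizing acc with
  | nil => simp [pvMaskB]
  | cons p L ih =>
    simp only [pvMaskB, List.foldl_cons]
    by_cases h : cs.contains p.2 = true
    · rw [if_pos h, if_pos h]
      show pvMaskB cs (acc ||| (1 <<< p.1)) L = acc ||| pvMaskB cs (0 ||| (1 <<< p.1)) L
      rw [ih (acc ||| (1 <<< p.1)), ih (0 ||| (1 <<< p.1))]
      simp [Nat.lor_assoc]
    · rw [if_neg h, if_neg h]
      exact ih acc

theorem stepB (cs : List String) (p : Nat × String) (L : List (Nat × String)) :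
    pvMaskB cs 0 (p :: L) = (if cs.contains p.2 then 1 <<< p.1 else 0) ||| pvMaskB cs 0 L := by
  show pvMaskB cs (if cs.contains p.2 then 0 ||| (1 <<< p.1) else 0) L = _
  rw [splitB]
  by_cases h : cs.contains p.2 = true
  · rw [if_pos h, if_pos h]
    simp
  · rw [if_neg h, if_neg h]

-- every mask produced from positions ≥ s is a multiple of 2^s (written as a left shift)
theorem orShift (cs : List String) (L : List String) (s : Nat) :
    ∃ m, pvMaskB cs 0 (pvEnumN s L) = m <<< s := by
  induction L generalizing s with
  | nil => exact ⟨0, by simp [pvEnumN, pvMaskB, Nat.shiftLeft_eq]⟩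
  | cons x xs ih =>
    obtain ⟨m, hm⟩ := ih (s + 1)
    rw [show pvEnumN s (x :: xs) = (s, x) :: pvEnumN (s + 1) xs from rfl, stepB, hm]
    by_cases h : cs.contains x = true
    · refine ⟨1 ||| (2*m), ?_⟩
      rw [if_pos h]
      have h1 : m <<< (s+1) = (2*m) <<< s := by
        simp [Nat.shiftLeft_eq, Nat.pow_succ]; ring
      rw [h1, shl_lor]
    · refine ⟨2*m, ?_⟩
      rw [if_neg h]
      have h1 : m <<< (s+1) = (2*m) <<< s := by
        simp [Nat.shiftLeft_eq, Nat.pow_succ]; ring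
      simp [h1]

-- the SUM over the bit table equals the OR over the enumerated table (bits are distinct powers of two)
theorem sumN_eq_or (cs : List String) (L : List String) (s : Nat) :
    pvSumN cs (pvTblN s L) = pvMaskB cs 0 (pvEnumN s L) := by
  induction L generalizing s with
  | nil => rfl
  | cons x xs ih =>
    rw [show pvTblN s (x :: xs) = (x, 1 <<< s) :: pvTblN (s + 1) xs from rfl,
        show pvEnumN s (x :: xs) = (s, x) :: pvEnumN (s + 1) xs from rfl,
        stepB]
    obtain ⟨m, hm⟩ := orShift cs xs (s + 1)
    simp only [pvSumN, ih (s + 1), hm]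
    by_cases h : cs.contains x = true
    · simp only [if_pos h]
      exact (lor_disj_add s m).symm
    · simp only [if_neg h]
      simp

theorem keyB (c : String) (cs : List String) (L : List (Nat × String)) :
    pvMaskB (c :: cs) 0 L = pvMaskB [c] 0 L ||| pvMaskB cs 0 L := by
  induction L with
  | nil => simp [pvMaskB]
  | cons p L ih =>
    rw [stepB, stepB, stepB, ih]
    have hcc : (c :: cs).contains p.2 = ([c].contains p.2 || cs.contains p.2) := by
      simp
    rw [hcc]
    cases h1 : [c].contains p.2 <;> cases h2 : cs.contains p.2 <;>
      simp [Nat.lor_assoc, Nat.lor_comm, lor_left_comm']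

theorem notmemB (c : String) (L : List (Nat × String)) (acc : Nat)
    (h : ∀ q ∈ L, q.2 ≠ c) : pvMaskB [c] acc L = acc := by
  induction L generalizing acc with
  | nil => rfl
  | cons p L ih =>
    have hne : p.2 ≠ c := h p (by simp)
    have hp : [c].contains p.2 = false := by
      simp only [List.contains_cons, List.contains_nil, Bool.or_false, beq_eq_false_iff_ne]
      exact hne
    simp only [pvMaskB, List.foldl_cons, hp, Bool.false_eq_true, if_false]
    exact ih acc (fun q hq => h q (List.mem_cons_of_mem _ hq))

theorem mem_pvEnumN (q : Nat × String) (s : Nat) (L : List String)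
    (h : q ∈ pvEnumN s L) : q.2 ∈ L := by
  induction L generalizing s with
  | nil => simp [pvEnumN] at h
  | cons x xs ih =>
    simp only [pvEnumN, List.mem_cons] at h
    rcases h with h | h
    · simp [h]
    · exact List.mem_cons_of_mem _ (ih _ h)

theorem singletonB (c : String) (L : List String) (s : Nat) (hnd : L.Nodup) :
    pvMaskB [c] 0 (pvEnumN s L)
      = match PySem.List.index? L c with
        | some i => 1 <<< (s + i)
        | none => 0 := by
  induction L generalizing s with
  | nil =>
    simp [pvEnumN, pvMaskB]
  | cons x xs ih =>
    have hnd' := List.nodup_cons.mp hnd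
    by_cases hc : x = c
    · subst hc
      have hcond : [x].contains x = true := by simp
      have hstep : pvMaskB [x] 0 (pvEnumN s (x :: xs))
          = pvMaskB [x] (1 <<< s) (pvEnumN (s + 1) xs) := by
        show pvMaskB [x] (if [x].contains x = true then 0 ||| (1 <<< s) else 0) (pvEnumN (s + 1) xs) = _
        rw [if_pos hcond]
        simp
      have hnomem : ∀ q ∈ pvEnumN (s + 1) xs, q.2 ≠ x := by
        intro q hq he
        exact hnd'.1 (he ▸ mem_pvEnumN q (s + 1) xs hq)
      rw [hstep, notmemB x _ _ hnomem, PySem.List.index?_cons_self]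
      simp
    · have hcond : [c].contains x = false := by
        simp only [List.contains_cons, List.contains_nil, Bool.or_false, beq_eq_false_iff_ne]
        exact hc
      have hstep : pvMaskB [c] 0 (pvEnumN s (x :: xs))
          = pvMaskB [c] 0 (pvEnumN (s + 1) xs) := by
        show pvMaskB [c] (if [c].contains x = true then 0 ||| (1 <<< s) else 0) (pvEnumN (s + 1) xs) = _
        rw [hcond]
        simp
      rw [hstep, ih (s + 1) hnd'.2, PySem.List.index?_cons_of_ne xs hc]
      cases PySem.List.index? xs c with
      | none => rfl
      | some i =>
        simp only [Option.map_some]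
        congr 1
        omega

theorem mainNat (cs : List String) :
    pvMaskA 0 cs = pvMaskB cs 0 (pvEnumN 0 pvCLASSES) := by
  induction cs with
  | nil =>
    have hz : ∀ (L : List (Nat × String)) (acc : Nat), pvMaskB ([] : List String) acc L = acc := by
      intro L
      induction L with
      | nil => intro acc; rfl
      | cons p L ih =>
        intro acc
        simp only [pvMaskB, List.foldl_cons, List.contains_nil, Bool.false_eq_true, if_false]
        exact ih acc
    simp [pvMaskA, hz]
  | cons c cs ih =>
    have hA : pvMaskA 0 (c :: cs) = pvBit c ||| pvMaskA 0 cs := by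
      simp only [pvMaskA, List.foldl_cons, pvBit]
      cases h : PySem.List.index? pvCLASSES c with
      | none =>
        show pvMaskA 0 cs = 0 ||| pvMaskA 0 cs
        simp [pvMaskA]
      | some i =>
        show pvMaskA (0 ||| (1 <<< i)) cs = (1 <<< i) ||| pvMaskA 0 cs
        rw [splitA]
        simp
    have hS : pvMaskB [c] 0 (pvEnumN 0 pvCLASSES) = pvBit c := by
      rw [singletonB c pvCLASSES 0 pvCLASSES_nodup]
      simp only [pvBit]
      cases PySem.List.index? pvCLASSES c <;> simp
    rw [hA, keyB, hS, ih]

-- ===== VERDICT (by name: the statement is the Claim_ definition above) =====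
theorem encode_restrict_class_spec : Claim_equal_encode_restrict_class := by
  intro cs _
  show encode_restrict_class cs = encode_restrict_class_alt cs
  have hA : encode_restrict_class cs = ((pvMaskA 0 cs : Nat) : Int) := castA cs 0
  have hB : encode_restrict_class_alt cs = ((pvSumN cs (pvTblN 0 pvCLASSES) : Nat) : Int) := by
    show pvSumBits (PySem.Set.ofList cs) pvBIT = _
    rw [pvBIT_eq_tbl, castB]
  rw [hA, hB, mainNat, sumN_eq_or]
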